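-- pv_equiv track=rewrite | github.com/ricardodioniciocbd/LexicoLexico | IDE_Compilador_Python/ejemplos/Sistema_de_procesamiento_d_cadenas.py | a_mayusculas
-- ===== SOURCE A (Python) =====
-- def convertir_a_mayuscula(caracter):
--     if caracter == 'a':
--         return 'A'
--     elif caracter == 'b':
--         return 'B'
--     elif caracter == 'c':
--         return 'C'
--     elif caracter == 'd':
--         return 'D'
--     elif caracter == 'e':
--         return 'E'
--     elif caracter == 'f':
--         return 'F'
--     elif caracter == 'g':
--         return 'G'
--     elif caracter == 'h':
--         return 'H'
--     elif caracter == 'i':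
--         return 'I'
--     elif caracter == 'j':
--         return 'J'
--     elif caracter == 'k':
--         return 'K'
--     elif caracter == 'l':
--         return 'L'
--     elif caracter == 'm':
--         return 'M'
--     elif caracter == 'n':
--         return 'N'
--     elif caracter == 'o':
--         return 'O'
--     elif caracter == 'p':
--         return 'P'
--     elif caracter == 'q':
--         return 'Q'
--     elif caracter == 'r':
--         return 'R'
--     elif caracter == 's':
--         return 'S'
--     elif caracter == 't':
--         return 'T'
--     elif caracter == 'u':
--         return 'U'
--     elif caracter == 'v':
--         return 'V'
--     elif caracter == 'w':
--         return 'W'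
--     elif caracter == 'x':
--         return 'X'
--     elif caracter == 'y':
--         return 'Y'
--     elif caracter == 'z':
--         return 'Z'
--     else:
--         return caracter
--
-- def a_mayusculas(texto):
--     resultado = ""
--     i = 0
--     while i < len(texto):
--         ch = texto[i]
--         mayus = convertir_a_mayuscula(ch)
--         resultado = resultado + mayus
--         i = i + 1
--     return resultado
-- ===== SOURCE B (Python) =====
-- def a_mayusculas(texto):
--     return ''.join(chr(ord(c) - 32) if 'a' <= c <= 'z' else c for c in texto)
-- ===== Notes on version B (the rewrite author's own statement) =====
-- stated objective: faster
-- what changed: Replaces the 27-branch per-character equality chain and quadratic string concatenation with a single range check plus a code-point offset (chr(ord(c)-32)) assembled by one str.join pass.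
import Mathlib
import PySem

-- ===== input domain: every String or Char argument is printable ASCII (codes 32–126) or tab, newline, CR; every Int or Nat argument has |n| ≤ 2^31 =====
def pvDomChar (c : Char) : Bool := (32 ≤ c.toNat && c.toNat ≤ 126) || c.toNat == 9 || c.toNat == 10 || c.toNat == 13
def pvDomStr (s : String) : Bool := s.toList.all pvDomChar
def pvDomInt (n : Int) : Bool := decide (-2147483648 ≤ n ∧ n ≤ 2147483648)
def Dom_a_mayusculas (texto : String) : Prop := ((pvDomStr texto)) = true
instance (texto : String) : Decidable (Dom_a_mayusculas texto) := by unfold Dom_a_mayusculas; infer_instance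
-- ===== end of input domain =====

-- B replaces A's 27-branch equality chain and repeated string concatenation by a
-- single range check plus a code-point offset, joined in one pass.

-- ===== PORT A =====
-- A's helper: the 26-way if/elif equality chain (each Python return value is a 1-char str)
def convertir_a_mayuscula (caracter : Char) : List Char :=
  if caracter = 'a' then ['A']
  else if caracter = 'b' then ['B']
  else if caracter = 'c' then ['C']
  else if caracter = 'd' then ['D']
  else if caracter = 'e' then ['E']
  else if caracter = 'f' then ['F']
  else if caracter = 'g' then ['G']
  else if caracter = 'h' then ['H']
  else if caracter = 'i' then ['I']
  else if caracter = 'j' then ['J']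
  else if caracter = 'k' then ['K']
  else if caracter = 'l' then ['L']
  else if caracter = 'm' then ['M']
  else if caracter = 'n' then ['N']
  else if caracter = 'o' then ['O']
  else if caracter = 'p' then ['P']
  else if caracter = 'q' then ['Q']
  else if caracter = 'r' then ['R']
  else if caracter = 's' then ['S']
  else if caracter = 't' then ['T']
  else if caracter = 'u' then ['U']
  else if caracter = 'v' then ['V']
  else if caracter = 'w' then ['W']
  else if caracter = 'x' then ['X']
  else if caracter = 'y' then ['Y']
  else if caracter = 'z' then ['Z']
  else [caracter]

-- A's while loop over indices 0..len-1, accumulating resultado = resultado + mayus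
def a_mayusculas (texto : String) : String :=
  String.ofList (texto.toList.foldl (fun resultado ch => resultado ++ convertir_a_mayuscula ch) [])

-- ===== PORT B =====
-- B: join of (chr(ord(c) - 32) if 'a' <= c <= 'z' else c) over the characters of texto
def pvUpChar (c : Char) : Char :=
  if 'a' ≤ c ∧ c ≤ 'z' then Char.ofNat (c.toNat - 32) else c

def a_mayusculas_alt (texto : String) : String :=
  String.ofList (texto.toList.map pvUpChar)

-- ===== PRECONDITION & SPEC =====
def Spec_a_mayusculas (texto : String) (out : String) : Prop := out = a_mayusculas_alt texto
instance (texto : String) (out : String) : Decidable (Spec_a_mayusculas texto out) := by unfold Spec_a_mayusculas; infer_instance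

-- ===== CLAIM (what is proved, stated in full; the proofs are below) =====
def Claim_equal_a_mayusculas : Prop := ∀ (texto : String), Dom_a_mayusculas texto → Spec_a_mayusculas texto (a_mayusculas texto)

-- ===== LEMMAS AND PROOFS =====

-- A's equality chain computes exactly B's range-check-plus-offset, character by character.
set_option maxHeartbeats 1000000 in
lemma conv_eq_upChar (c : Char) : convertir_a_mayuscula c = [pvUpChar c] := by
  by_cases h : 'a' ≤ c ∧ c ≤ 'z'
  · obtain ⟨h1, h2⟩ := h
    have ha : 97 ≤ c.toNat := Nat.succ_le_of_lt h1
    have hb : c.toNat ≤ 122 := Nat.lt_succ_iff.mp (Nat.lt_succ_of_le h2)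
    set n := c.toNat with hn
    interval_cases n <;> (rw [← Char.ofNat_toNat c, ← hn]; decide)
  · simp only [convertir_a_mayuscula, pvUpChar, if_neg h]
    repeat' rw [if_neg (show _ by rintro rfl; exact h ⟨by decide, by decide⟩)]

lemma foldl_conv (l : List Char) (acc : List Char) :
    l.foldl (fun resultado ch => resultado ++ convertir_a_mayuscula ch) acc
      = acc ++ l.map pvUpChar := by
  induction l generalizing acc with
  | nil => simp
  | cons x xs ih => rw [List.foldl_cons, conv_eq_upChar, ih]; simp

-- ===== VERDICT (by name: the statement is the Claim_ definition above) =====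
theorem a_mayusculas_spec : Claim_equal_a_mayusculas := by
  intro texto _
  unfold Spec_a_mayusculas a_mayusculas a_mayusculas_alt
  rw [foldl_conv]
  rfl
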